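-- pv_equiv track=rewrite | github.com/W-O-W/workspace | python/python/data_loader.py | next_binary
-- ===== SOURCE A (Python) =====
-- def next_binary(x,i=0,add=True):
--     if add:
--         if i == len(x):
--             x[len(x)]=0
--         if x[i]==1:
--             x[i]=0
--             return next_binary(x,i=i+1)
--         else:
--             x[i]=1
--             return x
-- ===== SOURCE B (Python) =====
-- def next_binary(x, i=0, add=True):
--     # Two-phase rewrite: first a pure scan finds the first position j >= i that is
--     # not a 1-bit (or j == len(x)), then all positions in [i, j) are zeroed in bulk
--     # and position j is set to 1.  Mutates x in place and returns it, like A.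
--     if not add:
--         return None
--     j = i
--     while j != len(x) and x.get(j) == 1:
--         j += 1
--     for k in range(i, j):
--         x[k] = 0
--     if j == len(x):
--         x[j] = 0
--     x[j] = 1
--     return x
-- ===== Notes on version B (the rewrite author's own statement) =====
-- stated objective: alternative
-- what changed: A interleaves dict mutation with tail recursion (flip each 1-bit to 0 as it recurses); B first does a pure read-only scan to find the first non-1 position j, then bulk-writes zeros over [i, j) and sets bit j, in a single non-recursive pass.
import Mathlib
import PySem

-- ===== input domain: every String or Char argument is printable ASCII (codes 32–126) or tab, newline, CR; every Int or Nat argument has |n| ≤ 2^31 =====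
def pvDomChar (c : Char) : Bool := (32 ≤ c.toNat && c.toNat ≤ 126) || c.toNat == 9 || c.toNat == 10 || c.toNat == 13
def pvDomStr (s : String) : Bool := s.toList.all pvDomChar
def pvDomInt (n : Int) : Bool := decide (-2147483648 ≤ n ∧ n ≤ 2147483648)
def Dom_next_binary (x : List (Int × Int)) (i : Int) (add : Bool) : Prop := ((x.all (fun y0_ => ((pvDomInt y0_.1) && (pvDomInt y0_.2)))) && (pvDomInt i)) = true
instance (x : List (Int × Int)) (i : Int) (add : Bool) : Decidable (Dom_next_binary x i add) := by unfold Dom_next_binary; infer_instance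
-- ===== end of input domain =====

-- B replaces A's mutate-as-you-recurse carry with a read-only scan for the first
-- non-1 position followed by a bulk write; equivalence is about the RETURN value
-- (both Pythons also mutate the argument dict in place, in the same way).

-- ===== PORT A =====
-- A's tail recursion, made total with fuel (x.length + 1 steps always suffice
-- inside Pre_; each recursive call consumes a distinct key ≥ i).  The `none` on
-- a missing key is Python's KeyError, excluded by Pre_.
def nbGoA (fuel : Nat) (d : PySem.Dict Int Int) (i : Int) : Option (List (Int × Int)) :=
  match fuel with
  | 0 => none
  | fuel + 1 =>
    let d1 := if i = (d.size : Int) then d.insert (d.size : Int) 0 else d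
    match d1.get? i with
    | none => none            -- KeyError: x[i] with i not a key
    | some v =>
      if v = 1 then nbGoA fuel (d1.insert i 0) (i + 1)
      else some ((d1.insert i 1).items)

def next_binary (x : List (Int × Int)) (i : Int) (add : Bool) : Option (List (Int × Int)) :=
  if add then nbGoA (x.length + 1) (PySem.Dict.mk x) i else none

-- ===== PORT B =====
-- the `while j != len(x) and x.get(j) == 1: j += 1` scan (fuel as in port A)
def nbScan (fuel : Nat) (d : PySem.Dict Int Int) (j : Int) : Int :=
  match fuel with
  | 0 => j
  | fuel + 1 =>
    if j ≠ (d.size : Int) ∧ d.get? j = some 1 then nbScan fuel d (j + 1) else j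

def next_binary_alt (x : List (Int × Int)) (i : Int) (add : Bool) : Option (List (Int × Int)) :=
  if add then
    let d := PySem.Dict.mk x
    let j := nbScan (x.length + 1) d i
    let d := (PySem.List.pyRange i j 1).foldl (fun d k => d.insert k 0) d
    let d := if j = (d.size : Int) then d.insert j 0 else d
    some ((d.insert j 1).items)
  else none

-- ===== PRECONDITION & SPEC =====
-- Pre_ excludes exactly the inputs on which A raises KeyError: when add is true,
-- the carry scan from i must reach a stopping point j (j = len(x), or a key whose
-- value is not 1) with every index in between being a key of value 1 (and ≠ len(x)).
def Pre_next_binary (x : List (Int × Int)) (i : Int) (add : Bool) : Prop :=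
  add = true →
    ∃ j ∈ PySem.List.pyRange i (i + (x.length : Int) + 1) 1,
      (∀ k ∈ PySem.List.pyRange i j 1,
          k ≠ (x.length : Int) ∧ (PySem.Dict.mk x).get? k = some 1) ∧
      (j = (x.length : Int) ∨
        ((PySem.Dict.mk x).get? j ≠ none ∧ (PySem.Dict.mk x).get? j ≠ some 1))
instance (x : List (Int × Int)) (i : Int) (add : Bool) : Decidable (Pre_next_binary x i add) := by unfold Pre_next_binary; infer_instance

def pvWitness_next_binary : (List (Int × Int)) × Int × Bool := ([(0, 1), (1, 0)], 0, true)

def Spec_next_binary (x : List (Int × Int)) (i : Int) (add : Bool) (out : Option (List (Int × Int))) : Prop := out = next_binary_alt x i add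
instance (x : List (Int × Int)) (i : Int) (add : Bool) (out : Option (List (Int × Int))) : Decidable (Spec_next_binary x i add out) := by unfold Spec_next_binary; infer_instance

-- ===== CLAIM (what is proved, stated in full; the proofs are below) =====
def Claim_equal_next_binary : Prop := ∀ (x : List (Int × Int)) (i : Int) (add : Bool), Dom_next_binary x i add → Pre_next_binary x i add → Spec_next_binary x i add (next_binary x i add)

-- ===== LEMMAS AND PROOFS =====

-- the tail of next_binary_alt after the scan has produced j
def nbRes (d : PySem.Dict Int Int) (i j : Int) : Option (List (Int × Int)) :=
  let d := (PySem.List.pyRange i j 1).foldl (fun d k => d.insert k 0) d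
  let d := if j = (d.size : Int) then d.insert j 0 else d
  some ((d.insert j 1).items)

lemma nbScan_ge (fuel : Nat) (d : PySem.Dict Int Int) (j : Int) : j ≤ nbScan fuel d j := by
  induction fuel generalizing j with
  | zero => simp [nbScan]
  | succ f ih =>
    simp only [nbScan]
    split
    · exact le_trans (by omega) (ih (j + 1))
    · exact le_refl j

lemma nbScan_congr (fuel : Nat) (d d' : PySem.Dict Int Int) (j : Int)
    (hsz : d.size = d'.size) (hget : ∀ k, j ≤ k → d.get? k = d'.get? k) :
    nbScan fuel d j = nbScan fuel d' j := by
  induction fuel generalizing j with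
  | zero => rfl
  | succ f ih =>
    simp only [nbScan, hsz, hget j le_rfl]
    split
    · exact ih (j + 1) (fun k hk => hget k (by omega))
    · rfl

-- main invariant: with enough fuel and an error-free scan ahead, A's recursion
-- computes exactly B's scan-then-rebuild
lemma nbGoA_eq_res (fuel : Nat) (d : PySem.Dict Int Int) (i : Int)
    (h : ∃ j, i ≤ j ∧ j - i ≤ (fuel : Int) ∧
      (∀ k, i ≤ k → k < j → k ≠ (d.size : Int) ∧ d.get? k = some 1) ∧
      (j = (d.size : Int) ∨ (d.get? j ≠ none ∧ d.get? j ≠ some 1))) :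
    nbGoA (fuel + 1) d i = nbRes d i (nbScan (fuel + 1) d i) := by
  obtain ⟨j, hij, hfuel, hmid, hstop⟩ := h
  rcases eq_or_lt_of_le hij with rfl | hlt
  · -- stop immediately at i
    rcases eq_or_ne i ((d.size : Int)) with hlen | hns
    · -- i = d.size : insert a fresh 0 bit, read it back, set it to 1
      simp only [nbGoA, nbScan, nbRes, hlen]
      simp [PySem.Dict.get?_insert_self]
    · -- i ≠ d.size, so the stop condition says i is a key with value ≠ 1
      obtain ⟨hne, hne1⟩ := hstop.resolve_left hns
      cases hd : d.get? i with
      | none => exact absurd hd hne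
      | some v =>
        have hv1 : v ≠ 1 := by intro hv; exact hne1 (hv ▸ hd)
        simp only [nbGoA, nbScan, nbRes, if_neg hns, hd]
        simp [hns, hv1]
  · -- i < j : one carry step, then the induction hypothesis
    have hi := hmid i le_rfl hlt
    have hns : i ≠ (d.size : Int) := hi.1
    have hget : d.get? i = some 1 := hi.2
    cases fuel with
    | zero => omega
    | succ f =>
      have hcont : d.contains i = true := by
        rw [PySem.Dict.contains_eq_isSome_get?, hget]; rfl
      have hsz : ((d.insert i 0)).size = d.size := by
        rw [PySem.Dict.size_insert, if_pos hcont]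
      have hget' : ∀ k, i + 1 ≤ k → (d.insert i 0).get? k = d.get? k := by
        intro k hk
        exact PySem.Dict.get?_insert_of_ne (by omega) (d := d) (v := 0)
      -- unfold one step of A and of the scan
      have hA : nbGoA (f + 1 + 1) d i = nbGoA (f + 1) (d.insert i 0) (i + 1) := by
        simp only [nbGoA, if_neg hns, hget]
        simp
      have hS : nbScan (f + 1 + 1) d i = nbScan (f + 1) d (i + 1) := by
        simp only [nbScan]
        rw [if_pos ⟨hns, hget⟩]
      have hS' : nbScan (f + 1) d (i + 1) = nbScan (f + 1) (d.insert i 0) (i + 1) :=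
        (nbScan_congr _ _ _ _ hsz.symm (fun k hk => (hget' k hk).symm))
      have hIH : nbGoA (f + 1) (d.insert i 0) (i + 1)
          = nbRes (d.insert i 0) (i + 1) (nbScan (f + 1) (d.insert i 0) (i + 1)) := by
        apply nbGoA_eq_res
        refine ⟨j, by omega, by push_cast at hfuel ⊢; omega, ?_, ?_⟩
        · intro k hk1 hk2
          have := hmid k (by omega) hk2
          exact ⟨by rw [hsz]; exact this.1, by rw [hget' k hk1]; exact this.2⟩
        · rw [hsz, hget' j (by omega)]
          exact hstop
      -- the rebuild from i equals the rebuild from i+1 over d.insert i 0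
      have hj' : i < nbScan (f + 1) (d.insert i 0) (i + 1) :=
        lt_of_lt_of_le (by omega) (nbScan_ge _ _ _)
      have hres : nbRes d i (nbScan (f + 1) (d.insert i 0) (i + 1))
          = nbRes (d.insert i 0) (i + 1) (nbScan (f + 1) (d.insert i 0) (i + 1)) := by
        simp only [nbRes]
        rw [PySem.List.pyRange_one_cons hj']
        simp [List.foldl]
      rw [hA, hS, hS', hIH, ← hres]

-- ===== VERDICT (by name: the statement is the Claim_ definition above) =====
theorem next_binary_spec : Claim_equal_next_binary := by
  intro x i add hdom hpre
  unfold Spec_next_binary next_binary next_binary_alt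
  cases add with
  | false => simp
  | true =>
    obtain ⟨j, hjmem, hmid, hstop⟩ := hpre rfl
    rw [PySem.List.mem_pyRange_one] at hjmem
    have hsz : ((PySem.Dict.mk x).size : Int) = (x.length : Int) := rfl
    have := nbGoA_eq_res (x.length) (PySem.Dict.mk x) i ?_
    · rw [this]; rfl
    · refine ⟨j, hjmem.1, by omega, ?_, ?_⟩
      · intro k hk1 hk2
        have := hmid k (by rw [PySem.List.mem_pyRange_one]; exact ⟨hk1, hk2⟩)
        exact ⟨by rw [hsz]; exact this.1, this.2⟩
      · rw [hsz]; exact hstop
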